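-- pv_equiv track=rewrite | github.com/AndrewDorse/KNG7 | config.py | _normalize_strategy_mode
-- ===== SOURCE A (Python) =====
-- def _normalize_strategy_mode(raw: str | None) -> str:
--     """Canonicalize strategy_mode so strategy aliases always match engine guards."""
--     s = (raw or "iy2").strip().lower()
--     for ch in ("\r", "\n", "\t"):
--         s = s.replace(ch, "")
--     s = s.replace("-", "_")
--     s = "_".join(s.split())
--     if s in ("btc_perp15", "btc_perp_15", "perp15", "btc_15m_perp", "btc_perpetual_15m", "polymarket_btc_15m_perpetual"):
--         return "btc_perp15"
--     if s in ("volume_scalp_up", "volume_scalp", "vol_scalp_up"):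
--         return "volume_scalp_up"
--     if s in ("champ4_6s", "champ4", "champ4_live", "wallet_dual", "wallet_dual_live"):
--         return "champ4_6s"
--     if s in ("paladin", "paladin_live", "paladin_pair"):
--         return "paladin"
--     if s in ("paladin_v7", "paladin7", "paladin_v7_live", "kng3", "kng3_live"):
--         return "paladin_v7"
--     if s in ("paladin_v9", "paladin9", "paladin_v9_live", "kng3_v9", "v9_live"):
--         return "paladin_v9"
--     if s in ("shaman_v1", "shaman1", "shaman"):
--         return "shaman_v1"
--     if s in ("first_cheap_03", "cheap03", "3c_first", "first_cheap3"):
--         return "first_cheap_03"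
--     if s in ("iy2", "iy_2", "wallet_overlap", "wallet_overlap_live", "iy2_live"):
--         return "iy2"
--     if s in ("iy3", "iy_3", "wallet_overlap_path", "wallet_overlap_path_live", "iy3_live"):
--         return "iy3"
--     if "t10" in s:
--         return s
--     if "scalp" in s and "volume" in s:
--         return "volume_scalp_up"
--     if s in ("scalp_up", "btc_volume_scalp", "vol_scalp", "volumescalp"):
--         return "volume_scalp_up"
--     return s
-- ===== SOURCE B (Python) =====
-- _GROUPS = [
--     (("btc_perp15", "btc_perp_15", "perp15", "btc_15m_perp", "btc_perpetual_15m", "polymarket_btc_15m_perpetual"), "btc_perp15"),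
--     (("volume_scalp_up", "volume_scalp", "vol_scalp_up"), "volume_scalp_up"),
--     (("champ4_6s", "champ4", "champ4_live", "wallet_dual", "wallet_dual_live"), "champ4_6s"),
--     (("paladin", "paladin_live", "paladin_pair"), "paladin"),
--     (("paladin_v7", "paladin7", "paladin_v7_live", "kng3", "kng3_live"), "paladin_v7"),
--     (("paladin_v9", "paladin9", "paladin_v9_live", "kng3_v9", "v9_live"), "paladin_v9"),
--     (("shaman_v1", "shaman1", "shaman"), "shaman_v1"),
--     (("first_cheap_03", "cheap03", "3c_first", "first_cheap3"), "first_cheap_03"),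
--     (("iy2", "iy_2", "wallet_overlap", "wallet_overlap_live", "iy2_live"), "iy2"),
--     (("iy3", "iy_3", "wallet_overlap_path", "wallet_overlap_path_live", "iy3_live"), "iy3"),
-- ]
--
-- _TABLE = {alias: canon for aliases, canon in _GROUPS for alias in aliases}
--
--
-- def _normalize_strategy_mode(raw):
--     # one-pass state machine: instead of strip/lower/3x replace/replace/split/join
--     # staged passes, walk the characters once with a pending-separator flag
--     out = []
--     pending = False
--     for ch in (raw or "iy2"):
--         if ch in "\r\n\t":
--             continue
--         ch = ch.lower()
--         if ch.isspace():
--             pending = bool(out)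
--             continue
--         if pending:
--             out.append("_")
--             pending = False
--         out.append("_" if ch == "-" else ch)
--     s = "".join(out)
--     hit = _TABLE.get(s)
--     if hit is not None:
--         return hit
--     if "t10" in s:
--         return s
--     if "scalp" in s and "volume" in s:
--         return "volume_scalp_up"
--     if s in ("scalp_up", "btc_volume_scalp", "vol_scalp", "volumescalp"):
--         return "volume_scalp_up"
--     return s
-- ===== Notes on version B (the rewrite author's own statement) =====
-- stated objective: alternative
-- what changed: A's five staged whole-string passes (strip, lower, three replace calls, dash replace, split+join) are replaced by a single character-level state machine with a pending-separator flag that emits the cleaned string in one pass, and the ten sequential alias branches by one flattened alias->canonical dict lookup; the ordered substring fallbacks are kept.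
import Mathlib
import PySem

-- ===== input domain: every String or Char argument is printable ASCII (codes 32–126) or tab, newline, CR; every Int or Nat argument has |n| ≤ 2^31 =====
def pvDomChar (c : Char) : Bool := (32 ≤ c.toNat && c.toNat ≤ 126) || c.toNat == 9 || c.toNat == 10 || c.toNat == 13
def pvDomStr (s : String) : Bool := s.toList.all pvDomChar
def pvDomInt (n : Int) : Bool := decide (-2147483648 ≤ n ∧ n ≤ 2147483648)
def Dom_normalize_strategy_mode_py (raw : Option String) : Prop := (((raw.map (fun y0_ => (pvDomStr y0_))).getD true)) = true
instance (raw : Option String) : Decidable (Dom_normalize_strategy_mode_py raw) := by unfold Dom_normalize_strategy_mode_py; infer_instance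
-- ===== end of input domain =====

-- B replaces A's staged whole-string normalization passes (strip/lower, three replace calls,
-- dash replace, split+join) by a one-pass character state machine, and A's ten sequential alias
-- branches by one flattened alias->canonical table (alternative decomposition); return value only.

-- ===== PORT A =====
-- A, transliterated: the normalization preamble and the branch chain, in A's order.
def pvCleanA (raw : Option String) : String :=
  let base := match raw with | none => "iy2" | some r => if r = "" then "iy2" else r
  let s := PySem.Str.lower (PySem.Str.strip base)
  let s := ["\r", "\n", "\t"].foldl (fun t ch => PySem.Str.replace t ch "") s
  let s := PySem.Str.replace s "-" "_"
  PySem.Str.join "_" (PySem.Str.split₀ s)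

def pvDispatchA (s : String) : String :=
  if s ∈ ["btc_perp15", "btc_perp_15", "perp15", "btc_15m_perp", "btc_perpetual_15m", "polymarket_btc_15m_perpetual"] then "btc_perp15"
  else if s ∈ ["volume_scalp_up", "volume_scalp", "vol_scalp_up"] then "volume_scalp_up"
  else if s ∈ ["champ4_6s", "champ4", "champ4_live", "wallet_dual", "wallet_dual_live"] then "champ4_6s"
  else if s ∈ ["paladin", "paladin_live", "paladin_pair"] then "paladin"
  else if s ∈ ["paladin_v7", "paladin7", "paladin_v7_live", "kng3", "kng3_live"] then "paladin_v7"
  else if s ∈ ["paladin_v9", "paladin9", "paladin_v9_live", "kng3_v9", "v9_live"] then "paladin_v9"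
  else if s ∈ ["shaman_v1", "shaman1", "shaman"] then "shaman_v1"
  else if s ∈ ["first_cheap_03", "cheap03", "3c_first", "first_cheap3"] then "first_cheap_03"
  else if s ∈ ["iy2", "iy_2", "wallet_overlap", "wallet_overlap_live", "iy2_live"] then "iy2"
  else if s ∈ ["iy3", "iy_3", "wallet_overlap_path", "wallet_overlap_path_live", "iy3_live"] then "iy3"
  else if PySem.Str.isIn "t10" s then s
  else if PySem.Str.isIn "scalp" s && PySem.Str.isIn "volume" s then "volume_scalp_up"
  else if s ∈ ["scalp_up", "btc_volume_scalp", "vol_scalp", "volumescalp"] then "volume_scalp_up"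
  else s

def normalize_strategy_mode_py (raw : Option String) : String :=
  pvDispatchA (pvCleanA raw)

-- ===== PORT B =====
-- Source B _GROUPS / _TABLE: the flattened alias->canonical dict, built once
def pvGroups : List (List String × String) :=
  [(["btc_perp15", "btc_perp_15", "perp15", "btc_15m_perp", "btc_perpetual_15m", "polymarket_btc_15m_perpetual"], "btc_perp15"),
   (["volume_scalp_up", "volume_scalp", "vol_scalp_up"], "volume_scalp_up"),
   (["champ4_6s", "champ4", "champ4_live", "wallet_dual", "wallet_dual_live"], "champ4_6s"),
   (["paladin", "paladin_live", "paladin_pair"], "paladin"),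
   (["paladin_v7", "paladin7", "paladin_v7_live", "kng3", "kng3_live"], "paladin_v7"),
   (["paladin_v9", "paladin9", "paladin_v9_live", "kng3_v9", "v9_live"], "paladin_v9"),
   (["shaman_v1", "shaman1", "shaman"], "shaman_v1"),
   (["first_cheap_03", "cheap03", "3c_first", "first_cheap3"], "first_cheap_03"),
   (["iy2", "iy_2", "wallet_overlap", "wallet_overlap_live", "iy2_live"], "iy2"),
   (["iy3", "iy_3", "wallet_overlap_path", "wallet_overlap_path_live", "iy3_live"], "iy3")]

def pvTable : PySem.Dict String String :=
  PySem.Dict.ofList (pvGroups.flatMap (fun g => g.1.map (fun a => (a, g.2))))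

-- Source B normalization loop: one pass over the characters, out-list + pending-separator flag
def pvGo (acc : List Char) (pending : Bool) : List Char → List Char
  | [] => acc
  | c :: rest =>
    if c = '\r' ∨ c = '\n' ∨ c = '\t' then pvGo acc pending rest
    else
      let d := PySem.Chars.lowerChar c
      if PySem.Chars.isspace d then pvGo acc (!acc.isEmpty) rest
      else pvGo (acc ++ (if pending then ['_'] else []) ++ [if d = '-' then '_' else d]) false rest

def normalize_strategy_mode_py_alt (raw : Option String) : String :=
  let s := String.ofList (pvGo [] false (match raw with | none => "iy2" | some r => if r = "" then "iy2" else r).toList)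
  match PySem.Dict.get? pvTable s with
  | some hit => hit
  | none =>
    if PySem.Str.isIn "t10" s then s
    else if PySem.Str.isIn "scalp" s && PySem.Str.isIn "volume" s then "volume_scalp_up"
    else if s ∈ ["scalp_up", "btc_volume_scalp", "vol_scalp", "volumescalp"] then "volume_scalp_up"
    else s

-- ===== PRECONDITION & SPEC =====
def Spec_normalize_strategy_mode_py (raw : Option String) (out : String) : Prop := out = normalize_strategy_mode_py_alt raw
instance (raw : Option String) (out : String) : Decidable (Spec_normalize_strategy_mode_py raw out) := by unfold Spec_normalize_strategy_mode_py; infer_instance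

-- ===== CLAIM (what is proved, stated in full; the proofs are below) =====
def Claim_equal_normalize_strategy_mode_py : Prop := ∀ (raw : Option String), Dom_normalize_strategy_mode_py raw → Spec_normalize_strategy_mode_py raw (normalize_strategy_mode_py raw)

-- ===== LEMMAS AND PROOFS =====
-- proof-side helpers: the per-character normalizer and the space-free core machine
def pvN (c : Char) : Option Char :=
  let d := PySem.Chars.lowerChar c
  if d = '\r' ∨ d = '\n' ∨ d = '\t' then none else some (if d = '-' then '_' else d)

def pvGo2 (acc : List Char) (pending : Bool) : List Char → List Char
  | [] => acc
  | c :: rest =>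
    if PySem.Chars.isspace c then pvGo2 acc (!acc.isEmpty) rest
    else pvGo2 (acc ++ (if pending then ['_'] else []) ++ [c]) false rest

def pvJ (accW : List (List Char)) (cur : List Char) : List Char :=
  PySem.Chars.join ['_'] accW.reverse ++
    (if cur.isEmpty then [] else (if accW.isEmpty then [] else ['_']) ++ cur.reverse)

theorem pv_lower_mem_rnt (c : Char) :
    (PySem.Chars.lowerChar c = '\r' ∨ PySem.Chars.lowerChar c = '\n' ∨ PySem.Chars.lowerChar c = '\t')
      ↔ (c = '\r' ∨ c = '\n' ∨ c = '\t') := by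
  unfold PySem.Chars.lowerChar
  split_ifs with h
  · simp only [PySem.Chars.isupper, Bool.and_eq_true, decide_eq_true_eq] at h
    have h65 : 65 ≤ c.toNat := by have := h.1; rw [Char.le_def] at this; exact this
    have h90 : c.toNat ≤ 90 := by have := h.2; rw [Char.le_def] at this; exact this
    have hv : (Char.ofNat (c.toNat + 32)).toNat = c.toNat + 32 := by
      rw [Char.toNat_ofNat]; simp [Nat.isValidChar]; omega
    constructor
    · rintro (h' | h' | h') <;>
        · exfalso
          have ht := congrArg Char.toNat h'
          rw [hv] at ht
          have : c.toNat + 32 ≤ 13 + 0 := by rw [ht]; decide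
          omega
    · rintro (h' | h' | h') <;> (subst h'; exact absurd h65 (by decide))
  · exact Iff.rfl

theorem pvGo_eq_go2 : ∀ (cs : List Char) (acc : List Char) (pending : Bool),
    pvGo acc pending cs = pvGo2 acc pending (cs.filterMap pvN) := by
  intro cs
  induction cs with
  | nil => intro acc pending; rfl
  | cons c rest ih =>
    intro acc pending
    by_cases hr : c = '\r' ∨ c = '\n' ∨ c = '\t'
    · have hN : pvN c = none := by
        unfold pvN; rw [if_pos ((pv_lower_mem_rnt c).2 hr)]
      simp only [pvGo, if_pos hr, List.filterMap_cons, hN, ih]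
    · have hdr : ¬ (PySem.Chars.lowerChar c = '\r' ∨ PySem.Chars.lowerChar c = '\n' ∨ PySem.Chars.lowerChar c = '\t') :=
        fun h => hr ((pv_lower_mem_rnt c).1 h)
      have hN : pvN c = some (if PySem.Chars.lowerChar c = '-' then '_' else PySem.Chars.lowerChar c) := by
        unfold pvN; rw [if_neg hdr]
      simp only [pvGo, if_neg hr, List.filterMap_cons, hN]
      by_cases hs : PySem.Chars.isspace (PySem.Chars.lowerChar c) = true
      · have hd : ¬ PySem.Chars.lowerChar c = '-' := by
          intro h; rw [h] at hs; exact absurd hs (by decide)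
        simp only [pvGo2, if_neg hd]
        rw [if_pos hs, if_pos hs, ih]
      · have hs2 : PySem.Chars.isspace (if PySem.Chars.lowerChar c = '-' then '_' else PySem.Chars.lowerChar c) = false := by
          split_ifs with hd
          · decide
          · exact Bool.eq_false_iff.2 hs
        simp only [pvGo2, hs2, Bool.false_eq_true, if_false]
        rw [if_neg hs, ih]

theorem pv_replace_go_filter (c : Char) : ∀ (l : List Char) (fuel : Nat) (acc : List Char), l.length ≤ fuel →
    PySem.Chars.replace.go [c] [] fuel l acc = acc.reverse ++ l.filter (fun x => !(x == c)) := by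
  intro l
  induction l with
  | nil =>
    intro fuel acc _
    cases fuel <;> simp [PySem.Chars.replace.go]
  | cons x t ih =>
    intro fuel acc hlen
    cases fuel with
    | zero => simp at hlen
    | succ n =>
      rw [PySem.Chars.replace.go]
      by_cases hx : c = x
      · subst hx
        rw [if_pos (by simp [List.isPrefixOf])]
        simp only [List.length_singleton, List.drop_succ_cons, List.drop_zero, List.reverse_nil,
          List.nil_append]
        rw [ih n acc (by simpa using hlen)]
        simp
      · rw [if_neg (by simp [List.isPrefixOf, hx])]
        rw [ih n (x :: acc) (by simpa using hlen)]
        simp [Ne.symm hx]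

theorem pv_replace_filter (c : Char) (s : List Char) :
    PySem.Chars.replace s [c] [] = s.filter (fun x => !(x == c)) := by
  rw [PySem.Chars.replace]
  rw [if_neg (by simp)]
  exact pv_replace_go_filter c s s.length [] le_rfl

theorem pv_replace_go_map (a b : Char) : ∀ (l : List Char) (fuel : Nat) (acc : List Char), l.length ≤ fuel →
    PySem.Chars.replace.go [a] [b] fuel l acc = acc.reverse ++ l.map (fun x => if x == a then b else x) := by
  intro l
  induction l with
  | nil =>
    intro fuel acc _
    cases fuel <;> simp [PySem.Chars.replace.go]
  | cons x t ih =>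
    intro fuel acc hlen
    cases fuel with
    | zero => simp at hlen
    | succ n =>
      rw [PySem.Chars.replace.go]
      by_cases hx : a = x
      · subst hx
        rw [if_pos (by simp [List.isPrefixOf])]
        simp only [List.length_singleton, List.drop_succ_cons, List.drop_zero]
        rw [ih n ([b].reverse ++ acc) (by simpa using hlen)]
        simp
      · rw [if_neg (by simp [List.isPrefixOf, hx])]
        rw [ih n (x :: acc) (by simpa using hlen)]
        simp [Ne.symm hx]

theorem pv_replace_map (a b : Char) (s : List Char) :
    PySem.Chars.replace s [a] [b] = s.map (fun x => if x == a then b else x) := by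
  rw [PySem.Chars.replace]
  rw [if_neg (by simp)]
  exact pv_replace_go_map a b s s.length [] le_rfl

theorem pv_chain_core : ∀ l : List Char,
    ((((l.map PySem.Chars.lowerChar).filter (fun x => !(x == '\r'))).filter (fun x => !(x == '\n'))).filter
        (fun x => !(x == '\t'))).map (fun x => if x == '-' then '_' else x)
      = l.filterMap pvN := by
  intro l
  induction l with
  | nil => rfl
  | cons c t ih =>
    simp only [List.map_cons, List.filterMap_cons]
    by_cases hd : PySem.Chars.lowerChar c = '\r' ∨ PySem.Chars.lowerChar c = '\n' ∨ PySem.Chars.lowerChar c = '\t'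
    · have hN : pvN c = none := by unfold pvN; rw [if_pos hd]
      rw [hN]
      rcases hd with h | h | h
      · rw [List.filter_cons_of_neg (by simp [h])]; exact ih
      · rw [List.filter_cons_of_pos (by simp [h]), List.filter_cons_of_neg (by simp [h])]; exact ih
      · rw [List.filter_cons_of_pos (by simp [h]), List.filter_cons_of_pos (by simp [h]),
          List.filter_cons_of_neg (by simp [h])]
        exact ih
    · have hd' : PySem.Chars.lowerChar c ≠ '\r' ∧ PySem.Chars.lowerChar c ≠ '\n' ∧ PySem.Chars.lowerChar c ≠ '\t' := by
        tauto
      have hN : pvN c = some (if PySem.Chars.lowerChar c = '-' then '_' else PySem.Chars.lowerChar c) := by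
        unfold pvN; rw [if_neg hd]
      rw [hN,
        List.filter_cons_of_pos (by simp [hd'.1]),
        List.filter_cons_of_pos (by simp [hd'.2.1]),
        List.filter_cons_of_pos (by simp [hd'.2.2]),
        List.map_cons, ih]
      simp

theorem pv_join_snoc : ∀ (xs : List (List Char)) (y : List Char),
    PySem.Chars.join ['_'] (xs ++ [y]) =
      PySem.Chars.join ['_'] xs ++ (if xs.isEmpty then [] else ['_']) ++ y := by
  intro xs
  induction xs with
  | nil => intro y; simp [PySem.Chars.join_nil, PySem.Chars.join_singleton]
  | cons x t ih =>
    intro y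
    cases t with
    | nil =>
      rw [List.cons_append, List.nil_append, PySem.Chars.join_cons_cons, PySem.Chars.join_singleton,
        PySem.Chars.join_singleton]
      simp
    | cons a b =>
      rw [List.cons_append, List.cons_append, PySem.Chars.join_cons_cons,
        PySem.Chars.join_cons_cons, ← List.cons_append, ih]
      simp


theorem pv_join_ne_nil : ∀ (xs : List (List Char)), xs ≠ [] → (∀ w ∈ xs, w ≠ []) →
    PySem.Chars.join ['_'] xs ≠ [] := by
  intro xs
  cases xs with
  | nil => intro h _; exact absurd rfl h
  | cons x t =>
    intro _ hw
    cases t with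
    | nil =>
      rw [PySem.Chars.join_singleton]
      exact hw x (List.mem_cons_self ..)
    | cons a b =>
      rw [PySem.Chars.join_cons_cons]
      intro h
      have := List.append_eq_nil_iff.1 (List.append_eq_nil_iff.1 h).1
      exact absurd this.2 (by simp)

theorem pv_go_nil (cur : List Char) (acc : List (List Char)) :
    PySem.Chars.split₀.go [] cur acc =
      if cur.isEmpty then acc.reverse else (cur.reverse :: acc).reverse := by
  rw [PySem.Chars.split₀.go]

theorem pv_go_cons_space (c : Char) (rest cur : List Char) (acc : List (List Char))
    (hc : PySem.Chars.isspace c = true) :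
    PySem.Chars.split₀.go (c :: rest) cur acc =
      if cur.isEmpty then PySem.Chars.split₀.go rest [] acc
      else PySem.Chars.split₀.go rest [] (cur.reverse :: acc) := by
  conv_lhs => rw [PySem.Chars.split₀.go]
  simp [hc]

theorem pv_go_cons_word (c : Char) (rest cur : List Char) (acc : List (List Char))
    (hc : ¬ PySem.Chars.isspace c = true) :
    PySem.Chars.split₀.go (c :: rest) cur acc = PySem.Chars.split₀.go rest (c :: cur) acc := by
  conv_lhs => rw [PySem.Chars.split₀.go]
  simp [hc]

theorem pv_J_empty (accW : List (List Char)) (hW : ∀ w ∈ accW, w ≠ []) :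
    (pvJ accW []).isEmpty = accW.isEmpty := by
  unfold pvJ
  cases accW with
  | nil => simp [PySem.Chars.join_nil]
  | cons a b =>
    simp only [List.isEmpty_nil, if_pos, List.append_nil, List.isEmpty_cons]
    have hne := pv_join_ne_nil ((a :: b).reverse) (by simp)
      (fun w hw => hW w (List.mem_reverse.1 hw))
    cases hE : (PySem.Chars.join ['_'] (a :: b).reverse).isEmpty with
    | false => rfl
    | true => exact absurd (List.isEmpty_iff.1 hE) hne

theorem pv_J_push (accW : List (List Char)) (cur : List Char) (hcur : ¬ cur.isEmpty = true) :
    pvJ (cur.reverse :: accW) [] = pvJ accW cur := by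
  unfold pvJ
  rw [List.reverse_cons, pv_join_snoc]
  simp only [List.isEmpty_nil, if_pos, List.append_nil, if_neg hcur, List.isEmpty_reverse,
    List.append_assoc]

theorem pv_J_ne_nil (accW : List (List Char)) (cur : List Char) (hcur : ¬ cur.isEmpty = true) :
    ¬ (pvJ accW cur).isEmpty = true := by
  unfold pvJ
  rw [if_neg hcur]
  intro h
  rw [List.isEmpty_iff] at h
  have := (List.append_eq_nil_iff.1 h).2
  have := (List.append_eq_nil_iff.1 this).2
  rw [List.reverse_eq_nil_iff] at this
  subst this
  exact hcur rfl

theorem pv_J_word (accW : List (List Char)) (cur : List Char) (c : Char) :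
    pvJ accW cur ++ (if (cur.isEmpty && !accW.isEmpty) then ['_'] else []) ++ [c]
      = pvJ accW (c :: cur) := by
  unfold pvJ
  by_cases hcur : cur.isEmpty
  · have : cur = [] := by cases cur; rfl; simp at hcur
    subst this
    cases accW with
    | nil => simp
    | cons a b => simp
  · simp [hcur, List.reverse_cons, List.append_assoc]

theorem pv_core : ∀ (ds : List Char) (accW : List (List Char)) (cur : List Char),
    (∀ w ∈ accW, w ≠ []) →
    pvGo2 (pvJ accW cur) (cur.isEmpty && !accW.isEmpty) ds
      = PySem.Chars.join ['_'] (PySem.Chars.split₀.go ds cur accW) := by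
  intro ds
  induction ds with
  | nil =>
    intro accW cur hW
    rw [pv_go_nil]
    by_cases hcur : cur.isEmpty
    · rw [if_pos hcur]
      have : cur = [] := by cases cur; rfl; simp at hcur
      subst this
      show pvJ accW [] = _
      simp [pvJ]
    · rw [if_neg hcur]
      show pvJ accW cur = _
      rw [List.reverse_cons, pv_join_snoc]
      unfold pvJ
      rw [if_neg hcur]
      simp
  | cons c rest ih =>
    intro accW cur hW
    by_cases hc : PySem.Chars.isspace c = true
    · rw [pv_go_cons_space c rest cur accW hc]
      show (if PySem.Chars.isspace c = true then
              pvGo2 (pvJ accW cur) (!(pvJ accW cur).isEmpty) rest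
            else pvGo2 (pvJ accW cur ++ (if (cur.isEmpty && !accW.isEmpty) then ['_'] else []) ++ [c]) false rest) = _
      rw [if_pos hc]
      by_cases hcur : cur.isEmpty
      · have hcur' : cur = [] := by cases cur; rfl; simp at hcur
        subst hcur'
        rw [if_pos (show ([] : List Char).isEmpty = true from rfl), pv_J_empty accW hW]
        have := ih accW [] hW
        simpa using this
      · rw [if_neg hcur]
        have hflag : (pvJ accW cur).isEmpty = false :=
          Bool.eq_false_iff.2 (pv_J_ne_nil accW cur hcur)
        rw [hflag]
        have hW' : ∀ w ∈ (cur.reverse :: accW), w ≠ [] := by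
          intro w hw
          rcases List.mem_cons.1 hw with h | h
          · subst h
            simp only [ne_eq, List.reverse_eq_nil_iff]
            intro h
            subst h
            exact hcur rfl
          · exact hW w h
        have := ih (cur.reverse :: accW) [] hW'
        rw [pv_J_push accW cur hcur] at this
        simpa using this
    · rw [pv_go_cons_word c rest cur accW hc]
      show (if PySem.Chars.isspace c = true then
              pvGo2 (pvJ accW cur) (!(pvJ accW cur).isEmpty) rest
            else pvGo2 (pvJ accW cur ++ (if (cur.isEmpty && !accW.isEmpty) then ['_'] else []) ++ [c]) false rest) = _
      rw [if_neg hc, pv_J_word accW cur c]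
      have := ih accW (c :: cur) hW
      simpa using this

theorem pv_go_space_tail : ∀ (w : List Char), (∀ c ∈ w, PySem.Chars.isspace c = true) →
    ∀ (cur : List Char) (acc : List (List Char)),
      PySem.Chars.split₀.go w cur acc = PySem.Chars.split₀.go [] cur acc := by
  intro w
  induction w with
  | nil => intro _ _ _; rfl
  | cons c rest ih =>
    intro hw cur acc
    have hc : PySem.Chars.isspace c = true := hw c (List.mem_cons_self ..)
    have hr : ∀ x ∈ rest, PySem.Chars.isspace x = true := fun x hx => hw x (List.mem_cons_of_mem _ hx)
    rw [pv_go_cons_space c rest cur acc hc]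
    by_cases hcur : cur.isEmpty
    · rw [if_pos hcur, ih hr, pv_go_nil, pv_go_nil]
      cases cur with
      | nil => rfl
      | cons a b => simp at hcur
    · rw [if_neg hcur, ih hr, pv_go_nil, pv_go_nil]
      cases cur with
      | nil => simp at hcur
      | cons a b => rfl

theorem pv_go_append_space : ∀ (t w : List Char), (∀ c ∈ w, PySem.Chars.isspace c = true) →
    ∀ (cur : List Char) (acc : List (List Char)),
      PySem.Chars.split₀.go (t ++ w) cur acc = PySem.Chars.split₀.go t cur acc := by
  intro t
  induction t with
  | nil =>
    intro w hw cur acc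
    simpa using pv_go_space_tail w hw cur acc
  | cons c rest ih =>
    intro w hw cur acc
    rw [List.cons_append]
    by_cases hc : PySem.Chars.isspace c = true
    · rw [pv_go_cons_space c (rest ++ w) cur acc hc, pv_go_cons_space c rest cur acc hc]
      by_cases hcur : cur.isEmpty
      · rw [if_pos hcur, if_pos hcur, ih w hw]
      · rw [if_neg hcur, if_neg hcur, ih w hw]
    · rw [pv_go_cons_word c (rest ++ w) cur acc hc, pv_go_cons_word c rest cur acc hc, ih w hw]

theorem pv_split_space_prefix : ∀ (w : List Char), (∀ c ∈ w, PySem.Chars.isspace c = true) →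
    ∀ t, PySem.Chars.split₀ (w ++ t) = PySem.Chars.split₀ t := by
  intro w
  induction w with
  | nil => intro _ t; rfl
  | cons c rest ih =>
    intro hw t
    have hc : PySem.Chars.isspace c = true := hw c (List.mem_cons_self ..)
    have hr : ∀ x ∈ rest, PySem.Chars.isspace x = true := fun x hx => hw x (List.mem_cons_of_mem _ hx)
    unfold PySem.Chars.split₀
    rw [List.cons_append, pv_go_cons_space c (rest ++ t) [] [] hc]
    simp only [List.isEmpty_nil, if_pos]
    exact ih hr t

-- a whitespace character passes pvN unchanged (or is removed)
theorem pv_space_pvN (c : Char) (hc : PySem.Chars.isspace c = true) :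
    pvN c = none ∨ pvN c = some c := by
  have hup : PySem.Chars.isupper c = false := by
    revert hc
    simp only [PySem.Chars.isspace, PySem.Chars.isupper, Bool.or_eq_true, Bool.and_eq_true,
      decide_eq_true_eq, Bool.and_eq_false_iff, decide_eq_false_iff_not, Char.le_def]
    intro h
    by_cases h65 : 65 ≤ c.toNat
    · right; show ¬ (c.toNat ≤ 90); omega
    · left; show ¬ (65 ≤ c.toNat); omega
  have hfix : PySem.Chars.lowerChar c = c := by
    unfold PySem.Chars.lowerChar
    rw [hup]
    simp
  unfold pvN
  rw [hfix]
  by_cases hr : c = '\r' ∨ c = '\n' ∨ c = '\t'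
  · left; rw [if_pos hr]
  · right
    rw [if_neg hr, if_neg (fun h : c = '-' => by subst h; exact absurd hc (by decide))]

theorem pv_filterMap_space (w : List Char) (hw : ∀ c ∈ w, PySem.Chars.isspace c = true) :
    ∀ x ∈ w.filterMap pvN, PySem.Chars.isspace x = true := by
  intro x hx
  rcases List.mem_filterMap.1 hx with ⟨c, hc, hsome⟩
  rcases pv_space_pvN c (hw c hc) with h | h
  · rw [h] at hsome; exact absurd hsome (by simp)
  · rw [h] at hsome
    rw [Option.some_inj] at hsome
    subst hsome
    exact hw c hc

-- strip can be dropped under split₀ ∘ filterMap pvN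
theorem pv_split_strip (cs : List Char) :
    PySem.Chars.split₀ ((PySem.Chars.strip cs).filterMap pvN)
      = PySem.Chars.split₀ (cs.filterMap pvN) := by
  have hdecomp : cs = cs.takeWhile PySem.Chars.isspace ++
      (PySem.Chars.strip cs ++ ((cs.dropWhile PySem.Chars.isspace).reverse.takeWhile PySem.Chars.isspace).reverse) := by
    conv_lhs => rw [← List.takeWhile_append_dropWhile (p := PySem.Chars.isspace) (l := cs)]
    congr 1
    conv_lhs => rw [← List.reverse_reverse (cs.dropWhile PySem.Chars.isspace)]
    conv_lhs =>
      rw [← List.takeWhile_append_dropWhile (p := PySem.Chars.isspace)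
        (l := (cs.dropWhile PySem.Chars.isspace).reverse)]
    rw [List.reverse_append]
    rfl
  conv_rhs => rw [hdecomp]
  rw [List.filterMap_append, List.filterMap_append]
  rw [pv_split_space_prefix _ (pv_filterMap_space _ (fun c hc => List.mem_takeWhile_imp hc)) _]
  unfold PySem.Chars.split₀
  rw [pv_go_append_space _ _ (pv_filterMap_space _ (fun c hc => List.mem_takeWhile_imp (List.mem_reverse.1 hc)))]

-- the whole normalization, on the character-list level
theorem pv_norm_chars (base : List Char) :
    pvGo [] false base =
      PySem.Chars.join ['_'] (PySem.Chars.split₀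
        (PySem.Chars.replace
          (PySem.Chars.replace
            (PySem.Chars.replace
              (PySem.Chars.replace (PySem.Chars.lower (PySem.Chars.strip base)) ['\r'] [])
              ['\n'] [])
            ['\t'] [])
          ['-'] ['_'])) := by
  rw [pv_replace_filter, pv_replace_filter, pv_replace_filter, pv_replace_map]
  show pvGo [] false base = PySem.Chars.join ['_'] (PySem.Chars.split₀ _)
  rw [show PySem.Chars.lower (PySem.Chars.strip base)
        = (PySem.Chars.strip base).map PySem.Chars.lowerChar from rfl]
  rw [pv_chain_core (PySem.Chars.strip base), pv_split_strip]
  rw [pvGo_eq_go2]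
  have := pv_core (base.filterMap pvN) [] [] (by simp)
  simpa [pvJ, PySem.Chars.join_nil, PySem.Chars.split₀] using this

-- A's first ten exact-match branches, as an Option-valued chain (proof-side characterisation)
def pvAliasChain (s : String) : Option String :=
  if s ∈ ["btc_perp15", "btc_perp_15", "perp15", "btc_15m_perp", "btc_perpetual_15m", "polymarket_btc_15m_perpetual"] then some "btc_perp15"
  else if s ∈ ["volume_scalp_up", "volume_scalp", "vol_scalp_up"] then some "volume_scalp_up"
  else if s ∈ ["champ4_6s", "champ4", "champ4_live", "wallet_dual", "wallet_dual_live"] then some "champ4_6s"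
  else if s ∈ ["paladin", "paladin_live", "paladin_pair"] then some "paladin"
  else if s ∈ ["paladin_v7", "paladin7", "paladin_v7_live", "kng3", "kng3_live"] then some "paladin_v7"
  else if s ∈ ["paladin_v9", "paladin9", "paladin_v9_live", "kng3_v9", "v9_live"] then some "paladin_v9"
  else if s ∈ ["shaman_v1", "shaman1", "shaman"] then some "shaman_v1"
  else if s ∈ ["first_cheap_03", "cheap03", "3c_first", "first_cheap3"] then some "first_cheap_03"
  else if s ∈ ["iy2", "iy_2", "wallet_overlap", "wallet_overlap_live", "iy2_live"] then some "iy2"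
  else if s ∈ ["iy3", "iy_3", "wallet_overlap_path", "wallet_overlap_path_live", "iy3_live"] then some "iy3"
  else none

set_option maxRecDepth 100000 in
theorem pvTable_eq : pvTable = PySem.Dict.mk [("btc_perp15", "btc_perp15"), ("btc_perp_15", "btc_perp15"), ("perp15", "btc_perp15"), ("btc_15m_perp", "btc_perp15"), ("btc_perpetual_15m", "btc_perp15"), ("polymarket_btc_15m_perpetual", "btc_perp15"), ("volume_scalp_up", "volume_scalp_up"), ("volume_scalp", "volume_scalp_up"), ("vol_scalp_up", "volume_scalp_up"), ("champ4_6s", "champ4_6s"), ("champ4", "champ4_6s"), ("champ4_live", "champ4_6s"), ("wallet_dual", "champ4_6s"), ("wallet_dual_live", "champ4_6s"), ("paladin", "paladin"), ("paladin_live", "paladin"), ("paladin_pair", "paladin"), ("paladin_v7", "paladin_v7"), ("paladin7", "paladin_v7"), ("paladin_v7_live", "paladin_v7"), ("kng3", "paladin_v7"), ("kng3_live", "paladin_v7"), ("paladin_v9", "paladin_v9"), ("paladin9", "paladin_v9"), ("paladin_v9_live", "paladin_v9"), ("kng3_v9", "paladin_v9"), ("v9_live", "paladin_v9"), ("shaman_v1",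 "shaman_v1"), ("shaman1", "shaman_v1"), ("shaman", "shaman_v1"), ("first_cheap_03", "first_cheap_03"), ("cheap03", "first_cheap_03"), ("3c_first", "first_cheap_03"), ("first_cheap3", "first_cheap_03"), ("iy2", "iy2"), ("iy_2", "iy2"), ("wallet_overlap", "iy2"), ("wallet_overlap_live", "iy2"), ("iy2_live", "iy2"), ("iy3", "iy3"), ("iy_3", "iy3"), ("wallet_overlap_path", "iy3"), ("wallet_overlap_path_live", "iy3"), ("iy3_live", "iy3")] := by decide

set_option maxRecDepth 100000 in
theorem pvGet_eq_chain (s : String) : PySem.Dict.get? pvTable s = pvAliasChain s := by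
  rw [pvTable_eq]
  by_cases h1 : s = "btc_perp15"
  · subst h1; decide
  by_cases h2 : s = "btc_perp_15"
  · subst h2; decide
  by_cases h3 : s = "perp15"
  · subst h3; decide
  by_cases h4 : s = "btc_15m_perp"
  · subst h4; decide
  by_cases h5 : s = "btc_perpetual_15m"
  · subst h5; decide
  by_cases h6 : s = "polymarket_btc_15m_perpetual"
  · subst h6; decide
  by_cases h7 : s = "volume_scalp_up"
  · subst h7; decide
  by_cases h8 : s = "volume_scalp"
  · subst h8; decide
  by_cases h9 : s = "vol_scalp_up"
  · subst h9; decide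
  by_cases h10 : s = "champ4_6s"
  · subst h10; decide
  by_cases h11 : s = "champ4"
  · subst h11; decide
  by_cases h12 : s = "champ4_live"
  · subst h12; decide
  by_cases h13 : s = "wallet_dual"
  · subst h13; decide
  by_cases h14 : s = "wallet_dual_live"
  · subst h14; decide
  by_cases h15 : s = "paladin"
  · subst h15; decide
  by_cases h16 : s = "paladin_live"
  · subst h16; decide
  by_cases h17 : s = "paladin_pair"
  · subst h17; decide
  by_cases h18 : s = "paladin_v7"
  · subst h18; decide
  by_cases h19 : s = "paladin7"
  · subst h19; decide
  by_cases h20 : s = "paladin_v7_live"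
  · subst h20; decide
  by_cases h21 : s = "kng3"
  · subst h21; decide
  by_cases h22 : s = "kng3_live"
  · subst h22; decide
  by_cases h23 : s = "paladin_v9"
  · subst h23; decide
  by_cases h24 : s = "paladin9"
  · subst h24; decide
  by_cases h25 : s = "paladin_v9_live"
  · subst h25; decide
  by_cases h26 : s = "kng3_v9"
  · subst h26; decide
  by_cases h27 : s = "v9_live"
  · subst h27; decide
  by_cases h28 : s = "shaman_v1"
  · subst h28; decide
  by_cases h29 : s = "shaman1"
  · subst h29; decide
  by_cases h30 : s = "shaman"
  · subst h30; decide
  by_cases h31 : s = "first_cheap_03"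
  · subst h31; decide
  by_cases h32 : s = "cheap03"
  · subst h32; decide
  by_cases h33 : s = "3c_first"
  · subst h33; decide
  by_cases h34 : s = "first_cheap3"
  · subst h34; decide
  by_cases h35 : s = "iy2"
  · subst h35; decide
  by_cases h36 : s = "iy_2"
  · subst h36; decide
  by_cases h37 : s = "wallet_overlap"
  · subst h37; decide
  by_cases h38 : s = "wallet_overlap_live"
  · subst h38; decide
  by_cases h39 : s = "iy2_live"
  · subst h39; decide
  by_cases h40 : s = "iy3"
  · subst h40; decide
  by_cases h41 : s = "iy_3"
  · subst h41; decide
  by_cases h42 : s = "wallet_overlap_path"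
  · subst h42; decide
  by_cases h43 : s = "wallet_overlap_path_live"
  · subst h43; decide
  by_cases h44 : s = "iy3_live"
  · subst h44; decide
  simp [PySem.Dict.get?, pvAliasChain, beq_iff_eq,
    h1, h2, h3, h4, h5, h6, h7, h8, h9, h10, h11, h12, h13, h14, h15, h16, h17, h18, h19, h20, h21, h22, h23, h24, h25, h26, h27, h28, h29, h30, h31, h32, h33, h34, h35, h36, h37, h38, h39, h40, h41, h42, h43, h44, Ne.symm h1, Ne.symm h2, Ne.symm h3, Ne.symm h4, Ne.symm h5, Ne.symm h6, Ne.symm h7, Ne.symm h8, Ne.symm h9, Ne.symm h10, Ne.symm h11, Ne.symm h12, Ne.symm h13, Ne.symm h14, Ne.symm h15, Ne.symm h16, Ne.symm h17, Ne.symm h18, Ne.symm h19, Ne.symm h20, Ne.symm h21, Ne.symm h22, Ne.symm h23, Ne.symm h24, Ne.symm h25, Ne.symm h26, Ne.symm h27, Ne.symm h28, Ne.symm h29, Ne.symm h30, Ne.symm h31, Ne.symm h32, Ne.symm h33, Ne.symm h34, Ne.symm h35, Ne.symm h36, Ne.symm h37, Ne.symm h38, Ne.symm h39, Ne.symm h40,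 Ne.symm h41, Ne.symm h42, Ne.symm h43, Ne.symm h44]

theorem pvDispatch_eq (s : String) :
    pvDispatchA s =
      (match PySem.Dict.get? pvTable s with
       | some hit => hit
       | none =>
         if PySem.Str.isIn "t10" s then s
         else if PySem.Str.isIn "scalp" s && PySem.Str.isIn "volume" s then "volume_scalp_up"
         else if s ∈ ["scalp_up", "btc_volume_scalp", "vol_scalp", "volumescalp"] then "volume_scalp_up"
         else s) := by
  unfold pvDispatchA
  rw [pvGet_eq_chain]
  unfold pvAliasChain
  by_cases g1 : s ∈ (["btc_perp15", "btc_perp_15", "perp15", "btc_15m_perp", "btc_perpetual_15m", "polymarket_btc_15m_perpetual"] : List String)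
  · rw [if_pos g1, if_pos g1]
  rw [if_neg g1, if_neg g1]
  by_cases g2 : s ∈ (["volume_scalp_up", "volume_scalp", "vol_scalp_up"] : List String)
  · rw [if_pos g2, if_pos g2]
  rw [if_neg g2, if_neg g2]
  by_cases g3 : s ∈ (["champ4_6s", "champ4", "champ4_live", "wallet_dual", "wallet_dual_live"] : List String)
  · rw [if_pos g3, if_pos g3]
  rw [if_neg g3, if_neg g3]
  by_cases g4 : s ∈ (["paladin", "paladin_live", "paladin_pair"] : List String)
  · rw [if_pos g4, if_pos g4]
  rw [if_neg g4, if_neg g4]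
  by_cases g5 : s ∈ (["paladin_v7", "paladin7", "paladin_v7_live", "kng3", "kng3_live"] : List String)
  · rw [if_pos g5, if_pos g5]
  rw [if_neg g5, if_neg g5]
  by_cases g6 : s ∈ (["paladin_v9", "paladin9", "paladin_v9_live", "kng3_v9", "v9_live"] : List String)
  · rw [if_pos g6, if_pos g6]
  rw [if_neg g6, if_neg g6]
  by_cases g7 : s ∈ (["shaman_v1", "shaman1", "shaman"] : List String)
  · rw [if_pos g7, if_pos g7]
  rw [if_neg g7, if_neg g7]
  by_cases g8 : s ∈ (["first_cheap_03", "cheap03", "3c_first", "first_cheap3"] : List String)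
  · rw [if_pos g8, if_pos g8]
  rw [if_neg g8, if_neg g8]
  by_cases g9 : s ∈ (["iy2", "iy_2", "wallet_overlap", "wallet_overlap_live", "iy2_live"] : List String)
  · rw [if_pos g9, if_pos g9]
  rw [if_neg g9, if_neg g9]
  by_cases g10 : s ∈ (["iy3", "iy_3", "wallet_overlap_path", "wallet_overlap_path_live", "iy3_live"] : List String)
  · rw [if_pos g10, if_pos g10]
  rw [if_neg g10, if_neg g10]

-- the normalization agreement, lifted to String level
theorem pv_clean_base (base : String) :
    PySem.Str.join "_" (PySem.Str.split₀ (PySem.Str.replace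
        (["\r", "\n", "\t"].foldl (fun t ch => PySem.Str.replace t ch "")
          (PySem.Str.lower (PySem.Str.strip base))) "-" "_"))
      = String.ofList (pvGo [] false base.toList) := by
  have htl : (PySem.Str.join "_" (PySem.Str.split₀ (PySem.Str.replace
      (["\r", "\n", "\t"].foldl (fun t ch => PySem.Str.replace t ch "")
        (PySem.Str.lower (PySem.Str.strip base))) "-" "_"))).toList
      = pvGo [] false base.toList := by
    simp only [List.foldl]
    simp only [PySem.Str.toList_join, PySem.Str.split₀_map_toList, PySem.Str.toList_replace,
      PySem.Str.toList_lower, PySem.Str.toList_strip]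
    rw [pv_norm_chars base.toList]
    rfl
  rw [← htl, String.ofList_toList]

-- ===== VERDICT (by name: the statement is the Claim_ definition above) =====
set_option maxRecDepth 100000 in
theorem normalize_strategy_mode_py_spec : Claim_equal_normalize_strategy_mode_py := by
  intro raw _
  unfold Spec_normalize_strategy_mode_py
  cases raw with
  | none =>
    show pvDispatchA (pvCleanA none) = _
    have h1 : pvCleanA none = String.ofList (pvGo [] false ("iy2" : String).toList) :=
      pv_clean_base "iy2"
    rw [h1]
    exact pvDispatch_eq _
  | some r =>
    show pvDispatchA (pvCleanA (some r)) = _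
    have h1 : pvCleanA (some r)
        = String.ofList (pvGo [] false (if r = "" then "iy2" else r).toList) :=
      pv_clean_base (if r = "" then "iy2" else r)
    rw [h1]
    exact pvDispatch_eq _
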